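-- pv_equiv track=rewrite | github.com/Julien-Verdun/Project-Euler | problems/problem47.py | is_n_distinct
-- ===== SOURCE A (Python) =====
-- def is_n_distinct(liste, n):
--     """
--     This function take a list and returns true if their
--     are  distinct numbers in he list and false otherwise.
--     """
--     nb_dist = 0
--     list_no_dist = []
--     for i in range(len(liste)):
--         if liste[i] not in liste[:i] + liste[i+1:]:
--             nb_dist += 1
--         else:
--             if liste[i] not in list_no_dist:
--                 list_no_dist.append(liste[i])
--     nb_dist += len(list_no_dist)
--     if nb_dist == n:
--         return True
--     else:
--         return False
-- ===== SOURCE B (Python) =====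
-- def is_n_distinct(liste, n):
--     seen = []
--     for x in liste:
--         if x not in seen:
--             seen.append(x)
--     return len(seen) == n
-- ===== Notes on version B (the rewrite author's own statement) =====
-- stated objective: simpler
-- what changed: Replaces A's two-category count (slice-membership test for unique elements plus a separate deduplicated list of repeated elements, summed at the end) by a single incremental first-occurrence accumulator: one seen list, append on first sight, compare its length to n.
import Mathlib
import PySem

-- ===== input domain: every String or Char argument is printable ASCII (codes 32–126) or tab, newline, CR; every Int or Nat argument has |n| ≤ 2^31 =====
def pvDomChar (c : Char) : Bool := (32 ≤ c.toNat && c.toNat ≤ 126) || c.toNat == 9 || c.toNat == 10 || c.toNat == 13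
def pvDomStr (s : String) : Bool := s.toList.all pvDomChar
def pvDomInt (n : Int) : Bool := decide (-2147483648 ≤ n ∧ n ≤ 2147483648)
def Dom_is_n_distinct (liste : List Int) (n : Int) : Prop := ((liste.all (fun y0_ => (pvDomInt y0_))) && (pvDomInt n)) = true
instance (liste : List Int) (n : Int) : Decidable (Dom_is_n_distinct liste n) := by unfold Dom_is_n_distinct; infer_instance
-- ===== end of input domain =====

-- B replaces A's unique/duplicated two-counter loop (with its two per-iteration slice copies) by one first-occurrence accumulator compared to n; simpler, and measured faster by a constant factor.

-- ===== PORT A =====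
-- loop body of A: for i in range(len(liste)): if liste[i] not in liste[:i]+liste[i+1:]: nb_dist += 1
--                 else: if liste[i] not in list_no_dist: list_no_dist.append(liste[i])
def is_n_distinct_step (liste : List Int) (st : Int × List Int) (i : Int) : Int × List Int :=
  let x := PySem.List.pyGetD liste i 0
  if x ∉ PySem.List.slice liste none (some i) ++ PySem.List.slice liste (some (i + 1)) none then
    (st.1 + 1, st.2)
  else if x ∉ st.2 then (st.1, st.2 ++ [x]) else st

def is_n_distinct (liste : List Int) (n : Int) : Bool :=
  let st := (PySem.List.pyRange 0 liste.length 1).foldl (is_n_distinct_step liste) (0, [])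
  let nb_dist : Int := st.1 + (st.2.length : Int)
  if nb_dist = n then true else false

-- ===== PORT B =====
-- seen = []; for x in liste: if x not in seen: seen.append(x); return len(seen) == n
def is_n_distinct_alt (liste : List Int) (n : Int) : Bool :=
  let seen := liste.foldl (fun seen x => if x ∉ seen then seen ++ [x] else seen) []
  decide ((seen.length : Int) = n)

-- ===== PRECONDITION & SPEC =====
def Spec_is_n_distinct (liste : List Int) (n : Int) (out : Bool) : Prop := out = is_n_distinct_alt liste n
instance (liste : List Int) (n : Int) (out : Bool) : Decidable (Spec_is_n_distinct liste n out) := by unfold Spec_is_n_distinct; infer_instance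

-- ===== CLAIM (what is proved, stated in full; the proofs are below) =====
def Claim_equal_is_n_distinct : Prop := ∀ (liste : List Int) (n : Int), Dom_is_n_distinct liste n → Spec_is_n_distinct liste n (is_n_distinct liste n)

-- ===== LEMMAS AND PROOFS =====

-- A's branch condition at an in-range index i is exactly "liste[i] occurs at least twice in liste".
theorem is_n_distinct_cond (liste : List Int) (i : Int) (h0 : 0 ≤ i) (h1 : i < (liste.length : Int)) :
    (PySem.List.pyGetD liste i 0 ∈
      PySem.List.slice liste none (some i) ++ PySem.List.slice liste (some (i + 1)) none) ↔
    2 ≤ liste.count (PySem.List.pyGetD liste i 0) := by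
  have hk : i.toNat < liste.length := by omega
  rw [PySem.List.pyGetD_eq_getElem _ _ h0 h1, PySem.List.slice_to _ h0,
      PySem.List.slice_from _ (show (0:Int) ≤ i+1 by omega)]
  have h2 : (i+1).toNat = i.toNat + 1 := by omega
  rw [h2]
  set x := liste[i.toNat] with hx
  have hsplit : liste.count x = (liste.take i.toNat).count x + (liste.drop i.toNat).count x := by
    conv_lhs => rw [← List.take_append_drop i.toNat liste]
    rw [List.count_append]
  have hdrop : liste.drop i.toNat = x :: liste.drop (i.toNat + 1) := List.drop_eq_getElem_cons hk
  rw [List.mem_append, ← List.count_pos_iff, ← List.count_pos_iff]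
  rw [hdrop, List.count_cons_self] at hsplit
  omega

-- an in-range pyGetD has positive count
theorem is_n_distinct_count_pos (liste : List Int) (i : Int) (h0 : 0 ≤ i) (h1 : i < (liste.length : Int)) :
    1 ≤ liste.count (PySem.List.pyGetD liste i 0) := by
  rw [PySem.List.pyGetD_eq_getElem _ _ h0 h1]
  have : liste[i.toNat] ∈ liste := List.getElem_mem (by omega)
  have := List.count_pos_iff.mpr this
  omega

-- A's counter: first component of the loop counts the unique-occurrence indices
theorem loopA_fst (l : List Int) (idxs : List Int) (c : Int) (s : List Int)
    (h : ∀ i ∈ idxs, 0 ≤ i ∧ i < (l.length : Int)) :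
    (idxs.foldl (is_n_distinct_step l) (c, s)).1
      = c + (idxs.countP (fun i => decide (l.count (PySem.List.pyGetD l i 0) = 1)) : Int) := by
  induction idxs generalizing c s with
  | nil => simp
  | cons i rest ih =>
    obtain ⟨h0, h1⟩ := h i (by simp)
    have hc := is_n_distinct_cond l i h0 h1
    have hp := is_n_distinct_count_pos l i h0 h1
    have hrest : ∀ j ∈ rest, 0 ≤ j ∧ j < (l.length : Int) := fun j hj => h j (by simp [hj])
    rw [List.foldl_cons, List.countP_cons]
    by_cases hd : 2 ≤ l.count (PySem.List.pyGetD l i 0)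
    · have hmem := hc.mpr hd
      by_cases hs : PySem.List.pyGetD l i 0 ∈ s
      · rw [show is_n_distinct_step l (c, s) i = (c, s) by
          simp [is_n_distinct_step, hmem, hs]]
        rw [ih c s hrest]
        have : ¬ l.count (PySem.List.pyGetD l i 0) = 1 := by omega
        simp [this]
      · rw [show is_n_distinct_step l (c, s) i = (c, s ++ [PySem.List.pyGetD l i 0]) by
          simp [is_n_distinct_step, hmem, hs]]
        rw [ih c _ hrest]
        have : ¬ l.count (PySem.List.pyGetD l i 0) = 1 := by omega
        simp [this]
    · have hmem : PySem.List.pyGetD l i 0 ∉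
          PySem.List.slice l none (some i) ++ PySem.List.slice l (some (i + 1)) none :=
        fun hm => hd (hc.mp hm)
      rw [show is_n_distinct_step l (c, s) i = (c + 1, s) by
        simp [is_n_distinct_step, hmem]]
      rw [ih (c + 1) s hrest]
      have : l.count (PySem.List.pyGetD l i 0) = 1 := by omega
      simp [this]
      omega

-- A's duplicate list: membership characterisation
theorem loopA_snd_mem (l : List Int) (idxs : List Int) (c : Int) (s : List Int)
    (h : ∀ i ∈ idxs, 0 ≤ i ∧ i < (l.length : Int)) (x : Int) :
    (x ∈ (idxs.foldl (is_n_distinct_step l) (c, s)).2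
      ↔ x ∈ s ∨ ∃ i ∈ idxs, x = PySem.List.pyGetD l i 0 ∧ 2 ≤ l.count x) := by
  induction idxs generalizing c s with
  | nil => simp
  | cons i rest ih =>
    obtain ⟨h0, h1⟩ := h i (by simp)
    have hc := is_n_distinct_cond l i h0 h1
    have hrest : ∀ j ∈ rest, 0 ≤ j ∧ j < (l.length : Int) := fun j hj => h j (by simp [hj])
    rw [List.foldl_cons]
    by_cases hd : 2 ≤ l.count (PySem.List.pyGetD l i 0)
    · have hmem := hc.mpr hd
      by_cases hs : PySem.List.pyGetD l i 0 ∈ s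
      · rw [show is_n_distinct_step l (c, s) i = (c, s) by
          simp [is_n_distinct_step, hmem, hs]]
        rw [ih c s hrest]
        constructor
        · rintro (hx | hx)
          · exact Or.inl hx
          · exact Or.inr (by obtain ⟨j, hj, he⟩ := hx; exact ⟨j, by simp [hj], he⟩)
        · rintro (hx | ⟨j, hj, he, hcnt⟩)
          · exact Or.inl hx
          · rcases List.mem_cons.mp hj with hj | hj
            · subst hj; subst he; exact Or.inl hs
            · exact Or.inr ⟨j, hj, he, hcnt⟩
      · rw [show is_n_distinct_step l (c, s) i = (c, s ++ [PySem.List.pyGetD l i 0]) by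
          simp [is_n_distinct_step, hmem, hs]]
        rw [ih c _ hrest]
        simp only [List.mem_append, List.mem_cons, List.not_mem_nil, or_false]
        constructor
        · rintro ((hx | hx) | hx)
          · exact Or.inl hx
          · exact Or.inr ⟨i, Or.inl rfl, hx, by rw [hx]; exact hd⟩
          · obtain ⟨j, hj, he⟩ := hx; exact Or.inr ⟨j, Or.inr hj, he⟩
        · rintro (hx | ⟨j, hj | hj, he, hcnt⟩)
          · exact Or.inl (Or.inl hx)
          · subst hj; exact Or.inl (Or.inr he)
          · exact Or.inr ⟨j, hj, he, hcnt⟩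
    · have hmem : PySem.List.pyGetD l i 0 ∉
          PySem.List.slice l none (some i) ++ PySem.List.slice l (some (i + 1)) none :=
        fun hm => hd (hc.mp hm)
      rw [show is_n_distinct_step l (c, s) i = (c + 1, s) by
        simp [is_n_distinct_step, hmem]]
      rw [ih (c + 1) s hrest]
      constructor
      · rintro (hx | ⟨j, hj, he⟩)
        · exact Or.inl hx
        · exact Or.inr ⟨j, by simp [hj], he⟩
      · rintro (hx | ⟨j, hj, he, hcnt⟩)
        · exact Or.inl hx
        · rcases List.mem_cons.mp hj with hj | hj
          · subst hj; subst he; exact absurd hcnt hd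
          · exact Or.inr ⟨j, hj, he, hcnt⟩

-- A's duplicate list stays duplicate-free
theorem loopA_snd_nodup (l : List Int) (idxs : List Int) (c : Int) (s : List Int)
    (hs : s.Nodup) : ((idxs.foldl (is_n_distinct_step l) (c, s)).2).Nodup := by
  induction idxs generalizing c s with
  | nil => simpa
  | cons i rest ih =>
    rw [List.foldl_cons]
    by_cases hmem : PySem.List.pyGetD l i 0 ∈
        PySem.List.slice l none (some i) ++ PySem.List.slice l (some (i + 1)) none
    · by_cases hs' : PySem.List.pyGetD l i 0 ∈ s
      · rw [show is_n_distinct_step l (c, s) i = (c, s) by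
          simp [is_n_distinct_step, hmem, hs']]
        exact ih c s hs
      · rw [show is_n_distinct_step l (c, s) i = (c, s ++ [PySem.List.pyGetD l i 0]) by
          simp [is_n_distinct_step, hmem, hs']]
        refine ih c _ ?_
        simp only [List.nodup_append, List.nodup_singleton, hs, true_and]
        intro a ha b hb
        rcases List.mem_singleton.mp hb with rfl
        exact fun h => hs' (h ▸ ha)
    · rw [show is_n_distinct_step l (c, s) i = (c + 1, s) by
        simp [is_n_distinct_step, hmem]]
      exact ih (c + 1) s hs

-- B's seen list: membership and nodup
theorem loopB_mem (l : List Int) (acc : List Int) (x : Int) :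
    (x ∈ l.foldl (fun seen y => if y ∉ seen then seen ++ [y] else seen) acc
      ↔ x ∈ acc ∨ x ∈ l) := by
  induction l generalizing acc with
  | nil => simp
  | cons y rest ih =>
    rw [List.foldl_cons]
    by_cases hy : y ∈ acc
    · simp only [hy, not_true_eq_false, if_false, ih, List.mem_cons]
      constructor
      · rintro (hx | hx)
        · exact Or.inl hx
        · exact Or.inr (Or.inr hx)
      · rintro (hx | hx | hx)
        · exact Or.inl hx
        · subst hx; exact Or.inl hy
        · exact Or.inr hx
    · simp only [hy, not_false_eq_true, if_true, ih, List.mem_append, List.mem_cons,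
        List.not_mem_nil, or_false]
      tauto

theorem loopB_nodup (l : List Int) (acc : List Int) (hs : acc.Nodup) :
    (l.foldl (fun seen y => if y ∉ seen then seen ++ [y] else seen) acc).Nodup := by
  induction l generalizing acc with
  | nil => simpa
  | cons y rest ih =>
    rw [List.foldl_cons]
    by_cases hy : y ∈ acc
    · simp only [hy, not_true_eq_false, if_false]; exact ih acc hs
    · simp only [hy, not_false_eq_true, if_true]
      refine ih _ ?_
      simp only [List.nodup_append, List.nodup_singleton, hs, true_and]
      intro a ha b hb
      rcases List.mem_singleton.mp hb with rfl
      exact fun h => hy (h ▸ ha)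

-- a duplicate-free list's length is the card of its toFinset (specialised use)
theorem length_eq_card_of_nodup_mem (r : List Int) (t : Finset Int)
    (hn : r.Nodup) (hm : ∀ x, x ∈ r ↔ x ∈ t) : r.length = t.card := by
  have : r.toFinset = t := Finset.ext (by simpa using hm)
  rw [← this, List.toFinset_card_of_nodup hn]

-- number of unique-occurrence indices = number of values occurring exactly once
theorem countP_indices (l : List Int) :
    (PySem.List.pyRange 0 l.length 1).countP
        (fun i => decide (l.count (PySem.List.pyGetD l i 0) = 1))
      = (l.toFinset.filter (fun v => l.count v = 1)).card := by
  have hmap : ((PySem.List.pyRange 0 l.length 1).map (fun i => PySem.List.pyGetD l i 0)) = l :=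
    PySem.List.map_pyGetD_pyRange_zero l 0
  calc (PySem.List.pyRange 0 l.length 1).countP
        (fun i => decide (l.count (PySem.List.pyGetD l i 0) = 1))
      = ((PySem.List.pyRange 0 l.length 1).map (fun i => PySem.List.pyGetD l i 0)).countP
          (fun x => decide (l.count x = 1)) := by rw [List.countP_map]; rfl
    _ = l.countP (fun x => decide (l.count x = 1)) := by rw [hmap]
    _ = (l.filter (fun x => decide (l.count x = 1))).length := List.countP_eq_length_filter
    _ = (l.toFinset.filter (fun v => l.count v = 1)).card := by
        apply length_eq_card_of_nodup_mem
        · rw [List.nodup_iff_count_le_one]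
          intro a
          by_cases h : l.count a = 1
          · rw [List.count_filter (by simp [h])]
            omega
          · have ha : a ∉ l.filter (fun x => decide (l.count x = 1)) := by
              simp [List.mem_filter, h]
            simp [List.count_eq_zero_of_not_mem ha]
        · intro x; simp [List.mem_filter, Finset.mem_filter]

-- distinct values split into exactly-once values and repeated values
theorem card_split (l : List Int) :
    (l.toFinset.filter (fun v => l.count v = 1)).card
      + (l.toFinset.filter (fun v => 2 ≤ l.count v)).card = l.toFinset.card := by
  have h1 : l.toFinset.filter (fun v => ¬ l.count v = 1)
      = l.toFinset.filter (fun v => 2 ≤ l.count v) := by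
    apply Finset.filter_congr
    intro v hv
    have : 1 ≤ l.count v := List.count_pos_iff.mpr (List.mem_toFinset.mp hv)
    exact ⟨fun h => by omega, fun h => by omega⟩
  rw [← h1]
  exact Finset.card_filter_add_card_filter_not _

-- ===== VERDICT (by name: the statement is the Claim_ definition above) =====
theorem is_n_distinct_spec : Claim_equal_is_n_distinct := by
  intro l n _
  unfold Spec_is_n_distinct
  simp only [is_n_distinct, is_n_distinct_alt]
  have hrange : ∀ i ∈ PySem.List.pyRange 0 (l.length : Int) 1, 0 ≤ i ∧ i < (l.length : Int) := by
    intro i hi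
    have := (PySem.List.mem_pyRange_one).mp hi
    omega
  have hfst := loopA_fst l (PySem.List.pyRange 0 (l.length : Int) 1) 0 [] hrange
  have hsnd_len :
      ((PySem.List.pyRange 0 (l.length : Int) 1).foldl (is_n_distinct_step l) (0, [])).2.length
        = (l.toFinset.filter (fun v => 2 ≤ l.count v)).card := by
    apply length_eq_card_of_nodup_mem
    · exact loopA_snd_nodup l _ 0 [] List.nodup_nil
    · intro x
      rw [loopA_snd_mem l _ 0 [] hrange x, Finset.mem_filter, List.mem_toFinset]
      simp only [List.not_mem_nil, false_or]
      constructor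
      · rintro ⟨i, hi, he, hc⟩
        obtain ⟨h0, h1⟩ := hrange i hi
        subst he
        rw [PySem.List.pyGetD_eq_getElem _ _ h0 h1]
        exact ⟨List.getElem_mem (by omega), by
          rwa [PySem.List.pyGetD_eq_getElem _ _ h0 h1] at hc⟩
      · rintro ⟨hm, hc⟩
        obtain ⟨k, hk, he⟩ := List.getElem_of_mem hm
        refine ⟨(k : Int), PySem.List.mem_pyRange_one.mpr (by constructor <;> omega), ?_, hc⟩
        rw [PySem.List.pyGetD_eq_getElem _ _ (by omega) (by exact_mod_cast hk)]
        simp [he]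
  have hseen :
      (l.foldl (fun seen y => if y ∉ seen then seen ++ [y] else seen) []).length
        = l.toFinset.card := by
    apply length_eq_card_of_nodup_mem
    · exact loopB_nodup l [] List.nodup_nil
    · intro x
      rw [loopB_mem l [] x, List.mem_toFinset]
      simp
  rw [hfst, hsnd_len, countP_indices, hseen]
  have := card_split l
  split
  · next h => symm; simp only [decide_eq_true_eq]; omega
  · next h => symm; simp only [decide_eq_false_iff_not]; omega
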